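-- pv_equiv track=rewrite | github.com/develdeco/code-challenges | triplets.py | solution
-- ===== SOURCE A (Python) =====
-- def solution(arr, queries):
--     res = []
--     for q in queries:
--         count = 0
--         second = {}
--         third = {}
--         for x in arr:
--             if x in third:
--                 count += third[x]
--             if x in second:
--                 third[q[2]] = third.get(q[2],0) + second[x]
--             if x == q[0]:
--                 second[q[1]] = second.get(q[1],0) + 1
--         res.append(count)
--     return res
-- ===== SOURCE B (Python) =====
-- def solution(arr, queries):
--     res = []
--     for q in queries:
--         a, b, c = q[0], q[1], q[2]
--         ans = 0
--         prefix_a = 0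
--         suffix_c = arr.count(c)
--         for x in arr:
--             if x == c:
--                 suffix_c -= 1
--             if x == b:
--                 ans += prefix_a * suffix_c
--             if x == a:
--                 prefix_a += 1
--         res.append(ans)
--     return res
-- ===== Notes on version B (the rewrite author's own statement) =====
-- stated objective: faster
-- what changed: Replaces A's per-query two-dict running cross-accumulator DP (dict of a-prefix counts and of (a,b)-pair counts, triples accumulated at c-positions) with a plain-integer prefix-count x suffix-count scan: precompute count of c, then at each b-position add (#a seen so far) * (#c strictly after), removing all dict operations from the inner loop.
-- outside the precondition, e.g. on solution([168, -2, 1], [[-1, 0, 1], [2, 1], [67], [3, 2]]): A returns [0, 0, 0, 0], B raises IndexError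
import Mathlib
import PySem

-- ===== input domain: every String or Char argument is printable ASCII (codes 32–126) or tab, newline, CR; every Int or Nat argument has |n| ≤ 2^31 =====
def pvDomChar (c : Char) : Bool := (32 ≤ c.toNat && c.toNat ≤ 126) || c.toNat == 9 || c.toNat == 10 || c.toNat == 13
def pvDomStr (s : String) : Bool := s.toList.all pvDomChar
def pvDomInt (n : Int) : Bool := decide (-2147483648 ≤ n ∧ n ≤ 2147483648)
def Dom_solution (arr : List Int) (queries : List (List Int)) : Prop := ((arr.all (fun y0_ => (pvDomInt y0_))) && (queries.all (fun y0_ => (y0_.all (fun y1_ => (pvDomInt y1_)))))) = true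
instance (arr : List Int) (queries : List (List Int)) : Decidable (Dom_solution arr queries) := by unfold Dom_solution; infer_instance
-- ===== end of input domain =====

-- B replaces A's two-dict running cross-accumulator DP with a plain-integer prefix-a-count ×
-- suffix-c-count product summed at the b-positions (measured constant-factor faster: no dict
-- operations in the inner loop); return values only (neither program mutates its arguments).

-- ===== PORT A =====
-- body of A's inner 'for x in arr' loop (state: count, second, third); q[i] ported as pyGetD, total under Pre_
def stepA (q : List Int) (st : Int × PySem.Dict Int Int × PySem.Dict Int Int) (x : Int) :
    Int × PySem.Dict Int Int × PySem.Dict Int Int :=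
  let count := if st.2.2.contains x then st.1 + st.2.2.getD x 0 else st.1
  let third := if st.2.1.contains x then
      st.2.2.insert (PySem.List.pyGetD q 2 0) (st.2.2.getD (PySem.List.pyGetD q 2 0) 0 + st.2.1.getD x 0)
    else st.2.2
  let second := if x = PySem.List.pyGetD q 0 0 then
      st.2.1.insert (PySem.List.pyGetD q 1 0) (st.2.1.getD (PySem.List.pyGetD q 1 0) 0 + 1)
    else st.2.1
  (count, second, third)

-- body of A's outer 'for q in queries' loop: the count appended for one query
def aOne (arr : List Int) (q : List Int) : Int :=
  (arr.foldl (stepA q) (0, PySem.Dict.empty, PySem.Dict.empty)).1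

def solution (arr : List Int) (queries : List (List Int)) : List Int :=
  queries.foldl (fun res q => res ++ [aOne arr q]) []

-- ===== PORT B =====
-- body of B's inner 'for x in arr' loop (state: ans, prefix_a, suffix_c)
def stepB (a b c : Int) (st : Int × Int × Int) (x : Int) : Int × Int × Int :=
  let sc := if x = c then st.2.2 - 1 else st.2.2
  let ans := if x = b then st.1 + st.2.1 * sc else st.1
  let pa := if x = a then st.2.1 + 1 else st.2.1
  (ans, pa, sc)

-- body of B's outer 'for q in queries' loop: unpack a, b, c, seed suffix_c with arr.count(c), scan
def bOne (arr : List Int) (q : List Int) : Int :=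
  let a := PySem.List.pyGetD q 0 0
  let b := PySem.List.pyGetD q 1 0
  let c := PySem.List.pyGetD q 2 0
  (arr.foldl (stepB a b c) (0, 0, (arr.count c : Int))).1

def solution_alt (arr : List Int) (queries : List (List Int)) : List Int :=
  queries.foldl (fun res q => res ++ [bOne arr q]) []

-- ===== PRECONDITION & SPEC =====
-- Pre_ excludes inputs with a query shorter than 3 elements: B always unpacks q[0],q[1],q[2] and raises IndexError there, while A reads q[1]/q[2] lazily and so either raises too or accidentally returns 0 for that query.
def Pre_solution (arr : List Int) (queries : List (List Int)) : Prop :=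
  ∀ q ∈ queries, 3 ≤ q.length
instance (arr : List Int) (queries : List (List Int)) : Decidable (Pre_solution arr queries) := by
  unfold Pre_solution; infer_instance
def pvWitness_solution : List Int × List (List Int) := ([1, 2, 2, 1, 3], [[1, 2, 3], [2, 2, 3]])

def Spec_solution (arr : List Int) (queries : List (List Int)) (out : List Int) : Prop := out = solution_alt arr queries
instance (arr : List Int) (queries : List (List Int)) (out : List Int) : Decidable (Spec_solution arr queries out) := by unfold Spec_solution; infer_instance

-- ===== CLAIM (what is proved, stated in full; the proofs are below) =====
def Claim_equal_solution : Prop := ∀ (arr : List Int) (queries : List (List Int)), Dom_solution arr queries → Pre_solution arr queries → Spec_solution arr queries (solution arr queries)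

-- ===== LEMMAS AND PROOFS =====

-- number of pairs (j,k), j<k, with l[j]=b, l[k]=c
def pairsF (b c : Int) : List Int → Int
  | [] => 0
  | x :: s => (if x = b then (s.count c : Int) else 0) + pairsF b c s

-- number of triples (i,j,k), i<j<k, with l[i]=a, l[j]=b, l[k]=c
def triplesF (a b c : Int) : List Int → Int
  | [] => 0
  | x :: s => (if x = a then pairsF b c s else 0) + triplesF a b c s

lemma stepB_eq (a b c ans pa sc x : Int) :
    stepB a b c (ans, pa, sc) x =
      ((if x = b then ans + pa * (if x = c then sc - 1 else sc) else ans),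
       (if x = a then pa + 1 else pa),
       (if x = c then sc - 1 else sc)) := rfl

lemma foldB_spec (a b c : Int) :
    ∀ (l : List Int) (ans pa sc : Int), sc = (l.count c : Int) →
      (l.foldl (stepB a b c) (ans, pa, sc)).1
        = ans + pa * pairsF b c l + triplesF a b c l := by
  intro l
  induction l with
  | nil => intro ans pa sc h; simp [pairsF, triplesF]
  | cons x s ih =>
    intro ans pa sc h
    have hc : sc = (s.count c : Int) + (if x = c then 1 else 0) := by
      subst h; simp [List.count_cons]
    rw [List.foldl_cons, stepB_eq,
        ih _ _ _ (by rw [hc]; split_ifs <;> ring)]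
    simp only [pairsF, triplesF]
    rw [hc]
    split_ifs <;> ring

lemma stepA_eq (q : List Int) (count : Int) (second third : PySem.Dict Int Int) (x : Int) :
    stepA q (count, second, third) x =
      ((if third.contains x then count + third.getD x 0 else count),
       (if x = PySem.List.pyGetD q 0 0 then
          second.insert (PySem.List.pyGetD q 1 0) (second.getD (PySem.List.pyGetD q 1 0) 0 + 1)
        else second),
       (if second.contains x then
          third.insert (PySem.List.pyGetD q 2 0) (third.getD (PySem.List.pyGetD q 2 0) 0 + second.getD x 0)
        else third)) := rfl

-- A's inner loop, characterised: second carries (b ↦ #a's seen), third carries (c ↦ #(a,b)-pairs seen)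
lemma foldA_spec (q : List Int) (a b c : Int)
    (ha : PySem.List.pyGetD q 0 0 = a) (hb : PySem.List.pyGetD q 1 0 = b)
    (hc : PySem.List.pyGetD q 2 0 = c) :
    ∀ (l : List Int) (count : Int) (second third : PySem.Dict Int Int) (pa cab : Int),
      0 ≤ pa → 0 ≤ cab →
      (∀ y, second.get? y = if y = b ∧ 0 < pa then some pa else none) →
      (∀ y, third.get? y = if y = c ∧ 0 < cab then some cab else none) →
      (l.foldl (stepA q) (count, second, third)).1
        = count + cab * (l.count c : Int) + pa * pairsF b c l + triplesF a b c l := by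
  intro l
  induction l with
  | nil => intro count second third pa cab _ _ _ _; simp [pairsF, triplesF]
  | cons x s ih =>
    intro count second third pa cab hpa hcab h2 h3
    rw [List.foldl_cons, stepA_eq, ha, hb, hc]
    have key : (if third.contains x then count + third.getD x 0 else count)
        = count + (if x = c then cab else 0) := by
      rw [PySem.Dict.contains_eq_isSome_get?, h3]
      by_cases hxc : x = c
      · subst hxc
        by_cases hcb : 0 < cab
        · have hg : third.getD x 0 = cab := by
            rw [PySem.Dict.getD_eq_get?_getD, h3]; simp [hcb]
          simp [hcb, hg]
        · have hc0 : cab = 0 := by omega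
          simp [hc0]
      · simp [hxc]
    rw [key]
    have key2 : ∀ y, ((if x = a then second.insert b (second.getD b 0 + 1) else second).get? y)
        = if y = b ∧ 0 < pa + (if x = a then 1 else 0) then some (pa + (if x = a then 1 else 0)) else none := by
      intro y
      by_cases hxa : x = a
      · have hg : second.getD b 0 = pa := by
          rw [PySem.Dict.getD_eq_get?_getD, h2]
          by_cases hp : 0 < pa
          · simp [hp]
          · have hp0 : pa = 0 := by omega
            simp [hp0]
        rw [if_pos hxa, hg, PySem.Dict.get?_insert]
        by_cases hyb : y = b
        · have h01 : 0 < pa + (1 : Int) := by omega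
          simp [hyb, hxa, h01]
        · rw [if_neg hyb, h2]
          simp [hyb]
      · rw [if_neg hxa, h2]
        simp [hxa]
    have key3 : ∀ y, ((if second.contains x then
          third.insert c (third.getD c 0 + second.getD x 0) else third).get? y)
        = if y = c ∧ 0 < cab + (if x = b then pa else 0) then some (cab + (if x = b then pa else 0)) else none := by
      intro y
      rw [PySem.Dict.contains_eq_isSome_get?, h2]
      by_cases h1 : x = b ∧ 0 < pa
      · have hgx : second.getD x 0 = pa := by
          rw [PySem.Dict.getD_eq_get?_getD, h2]; simp [h1]
        have hgc : third.getD c 0 = cab := by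
          rw [PySem.Dict.getD_eq_get?_getD, h3]
          by_cases hcb : 0 < cab
          · simp [hcb]
          · have hc0 : cab = 0 := by omega
            simp [hc0]
        rw [if_pos (by simp [h1]), hgx, hgc, PySem.Dict.get?_insert]
        by_cases hyc : y = c
        · have h0 : 0 < cab + pa := by omega
          simp [hyc, h1.1, h0]
        · rw [if_neg hyc, h3]
          simp [hyc]
      · rw [if_neg (by simp [h1])]
        rw [h3]
        by_cases hxb : x = b
        · have hpa0 : pa = 0 := by
            by_contra hne
            exact h1 ⟨hxb, lt_of_le_of_ne hpa (fun h => hne h.symm)⟩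
          simp [hxb, hpa0]
        · simp [hxb]
    have hpa' : 0 ≤ pa + (if x = a then 1 else 0) := by split_ifs <;> omega
    have hcab' : 0 ≤ cab + (if x = b then pa else 0) := by split_ifs <;> omega
    rw [ih (count + (if x = c then cab else 0)) _ _
        (pa + (if x = a then 1 else 0)) (cab + (if x = b then pa else 0))
        hpa' hcab' key2 key3]
    have hcnt : ((x :: s).count c : Int) = (s.count c : Int) + (if x = c then 1 else 0) := by
      simp [List.count_cons]
    rw [hcnt]
    simp only [pairsF, triplesF]
    split_ifs <;> ring

-- per query, both inner loops compute the triple count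
lemma one_eq (arr q : List Int) : aOne arr q = bOne arr q := by
  unfold aOne bOne
  rw [foldA_spec q _ _ _ rfl rfl rfl arr 0 _ _ 0 0 le_rfl le_rfl
        (by intro y; simp) (by intro y; simp),
      foldB_spec _ _ _ arr 0 0 _ rfl]
  ring

-- ===== VERDICT (by name: the statement is the Claim_ definition above) =====
theorem solution_spec : Claim_equal_solution := by
  intro arr queries _ _
  unfold Spec_solution solution solution_alt
  rw [PySem.List.foldl_append_singleton_eq_map, PySem.List.foldl_append_singleton_eq_map]
  simp only [List.nil_append]
  exact List.map_congr_left (fun q _ => one_eq arr q)
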